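-- pv_equiv track=rewrite | github.com/BamlakT/Algo-courses-in-Epita-S1-2021 | s1-python-main/loops/S1_td2_loops_1.py | sumSums2
-- ===== SOURCE A (Python) =====
-- def u(i):
--     return 3*i + 2
--
-- def sumSums2(n):
--     '''
--     returns the sum of S_i with i from 0 to n
--     with only one loop
--     '''
--     s = 0
--     sumS = 0
--     i = 1
--     while i <= n:
--         s = s + u(i)      # or sumS = sumS + (n-i+1) * u(i)
--         sumS = sumS + s
--         i = i + 1
--     return sumS
-- ===== SOURCE B (Python) =====
-- def sumSums2(n):
--     # Closed-form: sum_{i=1}^{n} sum_{j=1}^{i} (3j+2) = n(n+1)(n+2)/2 + n(n+1), O(1).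
--     if n <= 0:
--         return 0
--     return n * (n + 1) * (n + 2) // 2 + n * (n + 1)
-- ===== Notes on version B (the rewrite author's own statement) =====
-- stated objective: faster
-- what changed: Replaced the O(n) accumulation loop by the closed-form Faulhaber polynomial n(n+1)(n+2)/2 + n(n+1).
import Mathlib
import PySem

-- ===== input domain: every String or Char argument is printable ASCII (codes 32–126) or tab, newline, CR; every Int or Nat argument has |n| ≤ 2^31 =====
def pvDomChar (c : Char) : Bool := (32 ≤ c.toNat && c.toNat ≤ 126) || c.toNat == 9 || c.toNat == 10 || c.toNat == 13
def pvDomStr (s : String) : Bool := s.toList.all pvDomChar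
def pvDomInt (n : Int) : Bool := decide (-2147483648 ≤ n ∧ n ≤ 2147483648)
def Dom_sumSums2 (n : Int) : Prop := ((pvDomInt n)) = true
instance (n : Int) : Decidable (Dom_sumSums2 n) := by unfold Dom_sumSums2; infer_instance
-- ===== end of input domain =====

-- B replaces A's O(n) accumulation loop by the closed-form polynomial n(n+1)(n+2)/2 + n(n+1) (faster).

-- ===== PORT A =====
-- helper u(i) = 3*i + 2
def uA (i : Int) : Int := 3 * i + 2

-- A's while loop: state (s, sumS, i), runs while i ≤ n
def sumSums2Loop (n s sumS i : Int) : Int :=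
  if i ≤ n then
    sumSums2Loop n (s + uA i) (sumS + (s + uA i)) (i + 1)
  else sumS
termination_by (n + 1 - i).toNat
decreasing_by omega

def sumSums2 (n : Int) : Int := sumSums2Loop n 0 0 1

-- ===== PORT B =====
def sumSums2_alt (n : Int) : Int :=
  if n ≤ 0 then 0
  else PySem.Int.floordiv (n * (n + 1) * (n + 2)) 2 + n * (n + 1)

-- ===== PRECONDITION & SPEC =====
def Spec_sumSums2 (n : Int) (out : Int) : Prop := out = sumSums2_alt n
instance (n : Int) (out : Int) : Decidable (Spec_sumSums2 n out) := by unfold Spec_sumSums2; infer_instance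

-- ===== CLAIM (what is proved, stated in full; the proofs are below) =====
def Claim_equal_sumSums2 : Prop := ∀ (n : Int), Dom_sumSums2 n → Spec_sumSums2 n (sumSums2 n)

-- ===== LEMMAS AND PROOFS =====

-- doubled closed form of the remaining contribution of the loop from index i:
-- R n i = 2 * Σ_{j=i}^{n} Σ_{k=i}^{j} (3k+2)
def pvR (n i : Int) : Int :=
  n * (n + 1) * (n + 2) - (i - 1) * i * (i + 1) - 3 * i * (i - 1) * (n - i + 1)
    + 2 * (n - i + 1) * (n - i + 2)

theorem pvR_step (n i : Int) :
    pvR n i = pvR n (i + 1) + 2 * (n + 1 - i) * (3 * i + 2) := by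
  unfold pvR; ring

theorem pvR_end (n i : Int) (h : i = n + 1) : pvR n i = 0 := by
  subst h; unfold pvR; ring

-- loop invariant: while i ≤ n+1 and 2*s matches the partial sum shape,
-- 2 * (loop result) = 2*sumS + 2*(n+1-i)*s + R n i
theorem sumSums2Loop_eq (m : Nat) :
    ∀ (n s sumS i : Int), i ≤ n + 1 → (n + 1 - i).toNat = m →
      2 * sumSums2Loop n s sumS i = 2 * sumS + 2 * (n + 1 - i) * s + pvR n i := by
  induction m with
  | zero =>
    intro n s sumS i hle hm
    have hi : i = n + 1 := by omega
    rw [sumSums2Loop]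
    have : ¬ i ≤ n := by omega
    simp only [this, if_false]
    rw [pvR_end n i hi]
    have : n + 1 - i = 0 := by omega
    rw [this]; ring
  | succ k ih =>
    intro n s sumS i hle hm
    have hlt : i ≤ n := by omega
    rw [sumSums2Loop]
    simp only [hlt, if_true]
    have := ih n (s + uA i) (sumS + (s + uA i)) (i + 1) (by omega) (by omega)
    rw [this, pvR_step n i]
    unfold uA; ring

theorem sumSums2_closed (n : Int) :
    2 * sumSums2 n = if n ≤ 0 then 0 else pvR n 1 := by
  by_cases h : n ≤ 0
  · simp only [h, if_true]
    unfold sumSums2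
    rw [sumSums2Loop]
    have : ¬ (1:Int) ≤ n := by omega
    simp [this]
  · simp only [h, if_false]
    have h1 : (1:Int) ≤ n + 1 := by omega
    have := sumSums2Loop_eq (n + 1 - 1).toNat n 0 0 1 h1 rfl
    unfold sumSums2
    rw [this]; ring

theorem sumSums2_spec : Claim_equal_sumSums2 := by
  unfold Claim_equal_sumSums2 Spec_sumSums2
  intro n _
  have hc := sumSums2_closed n
  by_cases h : n ≤ 0
  · simp only [h, if_true] at hc
    unfold sumSums2_alt
    simp only [h, if_true]
    omega
  · simp only [h, if_false] at hc
    unfold sumSums2_alt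
    simp only [h, if_false]
    have hdvd : (2:Int) ∣ n * (n + 1) * (n + 2) :=
      Dvd.dvd.mul_right (Int.even_mul_succ_self n).two_dvd _
    have hfd : PySem.Int.floordiv (n * (n + 1) * (n + 2)) 2 = n * (n + 1) * (n + 2) / 2 :=
      PySem.Int.floordiv_eq_ediv_of_pos (by omega)
    rw [hfd]
    have h2 : 2 * (n * (n + 1) * (n + 2) / 2) = n * (n + 1) * (n + 2) :=
      Int.mul_ediv_cancel' hdvd
    have hR : pvR n 1 = n * (n + 1) * (n + 2) + 2 * (n * (n + 1)) := by unfold pvR; ring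
    omega
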